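-- pv_equiv track=rewrite | github.com/FuchengSu/WorldStereo | src/general_utils.py | adjust_image_size
-- ===== SOURCE A (Python) =====
-- import math
--
-- def adjust_image_size(h, w):
--     """
--     Adjust h and w so that:
--     1. h_new is divisible by 16
--     2. w_new is divisible by 16
--     3. (h_new//16) * (w_new//16) is divisible by 8
--
--     Returns h_new and w_new as close to the original dimensions as possible (rounded up).
--     """
--     # Round h up to the nearest multiple of 16
--     h_new = math.ceil(h / 16) * 16
--
--     # Count the power of 2 in a = h_new // 16
--     a = h_new // 16
--     p = 0
--     temp = a
--     while temp > 0 and temp % 2 == 0: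
--         p += 1
--         temp //= 2
--
--     # b = w_new//16 must be divisible by 2^(3-p) to ensure a*b is divisible by 8
--     required_factor = 1 << max(0, 3 - p)  # 2^max(0, 3-p)
--
--     # Round w_new up to the smallest value satisfying the constraint
--     b = math.ceil(w / 16)
--     b = math.ceil(b / required_factor) * required_factor
--     w_new = b * 16
--
--     return h_new, w_new
-- ===== SOURCE B (Python) =====
-- def adjust_image_size(h, w):
--     # Round h up to a multiple of 16, then find w_new by direct search:
--     # bump b = ceil(w/16) upward until a*b is divisible by 8 (at most 7 steps).
--     h_new = -(-h // 16) * 16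
--     a = h_new // 16
--     b = -(-w // 16)
--     while (a * b) % 8 != 0:
--         b += 1
--     return h_new, b * 16
-- ===== Notes on version B (the rewrite author's own statement) =====
-- stated objective: alternative
-- what changed: Replaces A's factor-of-two counting loop plus two-stage ceiling rounding of w by a direct bounded search: starting from b = ceil(w/16), increment b until a*b is divisible by 8 (at most 7 steps), so no power-of-two bookkeeping or required_factor is computed at all.
-- intended difference: For h <= 0 (so a = ceil(h/16) <= 0) A's loop counts no factors of 2 and always rounds w up to a multiple of 128, while B's search stops at the first b with a*b divisible by 8 (any b works when a = 0); B's minimal rounding is the intended behaviour. — e.g. on adjust_image_size(0, 16): A returns (0, 128), B returns (0, 16)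
import Mathlib
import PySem

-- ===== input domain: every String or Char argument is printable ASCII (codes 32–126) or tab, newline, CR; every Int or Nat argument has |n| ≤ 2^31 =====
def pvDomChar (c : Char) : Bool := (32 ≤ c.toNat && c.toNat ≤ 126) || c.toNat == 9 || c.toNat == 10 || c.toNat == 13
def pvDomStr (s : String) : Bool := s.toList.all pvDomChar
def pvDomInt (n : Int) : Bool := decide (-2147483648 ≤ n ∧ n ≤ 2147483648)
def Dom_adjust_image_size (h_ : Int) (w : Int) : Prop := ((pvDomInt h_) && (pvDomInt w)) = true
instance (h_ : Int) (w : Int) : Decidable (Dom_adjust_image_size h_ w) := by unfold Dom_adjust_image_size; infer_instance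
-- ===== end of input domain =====

-- B replaces A's factor-of-two counting loop and staged ceiling rounding by a direct bounded search
-- for the first b ≥ ceil(w/16) with a*b divisible by 8; for h ≤ 0 (degenerate heights) B's search
-- stops at the minimal such b where A always rounds w up to a multiple of 128 (see D_ below).

-- ===== PORT A =====
-- math.ceil(x / y): Python's float division x/y is exact here (|x| ≤ 2^31+16 ≤ 2^53, y a small power of two),
-- so math.ceil(x / y) is the exact ceiling ⌈x/y⌉ = -((-x) // y).
def pyCeil (x y : Int) : Int := -(PySem.Int.floordiv (-x) y)

-- the while loop 'while temp > 0 and temp % 2 == 0: p += 1; temp //= 2'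
def countTwos (temp : Int) (p : Int) : Int :=
  if h : 0 < temp ∧ PySem.Int.mod temp 2 = 0 then
    countTwos (PySem.Int.floordiv temp 2) (p + 1)
  else p
termination_by temp.toNat
decreasing_by
  rw [PySem.Int.floordiv_eq_ediv_of_pos (by norm_num)]
  omega

def adjust_image_size (h_ : Int) (w : Int) : Int × Int :=
  let h_new := pyCeil h_ 16 * 16
  let a := PySem.Int.floordiv h_new 16
  let p := countTwos a 0
  let required_factor := (1 : Int) * 2 ^ (max 0 (3 - p)).toNat  -- 1 << max(0, 3 - p)
  let b := pyCeil w 16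
  let b2 := pyCeil b required_factor * required_factor
  (h_new, b2 * 16)

-- ===== PORT B =====
-- the while loop 'while (a * b) % 8 != 0: b += 1' (terminates: any multiple of 8 satisfies the test)
def searchB (a : Int) (b : Int) : Int :=
  if h : PySem.Int.mod (a * b) 8 ≠ 0 then searchB a (b + 1) else b
termination_by ((-b)% 8).toNat
decreasing_by
  rw [PySem.Int.mod_eq_emod_of_pos (by norm_num)] at h
  have hb : (-b)% 8 ≠ 0 := by
    intro h0
    apply h
    have h8 : (8 : Int) ∣ b := by omega
    obtain ⟨k, hk⟩ := h8
    subst hk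
    have : a * (8 * k) = 8 * (a * k) := by ring
    rw [this]
    simp [Int.mul_emod_right]
  have := Int.emod_nonneg (-b) (show (8:Int) ≠ 0 by norm_num)
  have := Int.emod_lt_of_pos (-(b+1)) (show (0:Int) < 8 by norm_num)
  have h2 : (-(b+1))% 8 = (-b)% 8 - 1 := by omega
  omega

def adjust_image_size_alt (h_ : Int) (w : Int) : Int × Int :=
  let h_new := -(PySem.Int.floordiv (-h_) 16) * 16
  let a := PySem.Int.floordiv h_new 16
  let b := searchB a (-(PySem.Int.floordiv (-w) 16))
  (h_new, b * 16)

-- ===== PRECONDITION & SPEC =====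
-- For h_ ≤ 0 the quantity a = ceil(h/16) is ≤ 0, A's loop counts no factors of 2 and A rounds w up to a
-- multiple of 128, while B's search stops at the first b = w_new//16 with a*b divisible by 8
-- (any b works when a = 0); B's minimal rounding is the intended behaviour.
def D_adjust_image_size (h_ : Int) (w : Int) : Prop :=
  h_ ≤ 0 ∧
  (let a := -(PySem.Int.floordiv (-h_) 16)
   let m := PySem.Int.mod (-(PySem.Int.floordiv (-w) 16)) 8
   m ≠ 0 ∧ m ≤ 8 - 8 / (Int.gcd a 8 : Int))
instance (h_ : Int) (w : Int) : Decidable (D_adjust_image_size h_ w) := by unfold D_adjust_image_size; infer_instance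

def Spec_adjust_image_size (h_ : Int) (w : Int) (out : Int × Int) : Prop :=
  ¬ D_adjust_image_size h_ w → out = adjust_image_size_alt h_ w
instance (h_ : Int) (w : Int) (out : Int × Int) : Decidable (Spec_adjust_image_size h_ w out) := by unfold Spec_adjust_image_size; infer_instance

def pvDiffWitness_adjust_image_size : Int × Int := (0, 16)
def pvDiffWitnessOut_adjust_image_size : (Int × Int) × (Int × Int) := ((0, 128), (0, 16))

-- ===== CLAIM (what is proved, stated in full; the proofs are below) =====
def Claim_unchanged_adjust_image_size : Prop := ∀ (h_ : Int) (w : Int), Dom_adjust_image_size h_ w → Spec_adjust_image_size h_ w (adjust_image_size h_ w)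
def Claim_changed_adjust_image_size : Prop := Dom_adjust_image_size (pvDiffWitness_adjust_image_size.1) (pvDiffWitness_adjust_image_size.2) ∧ D_adjust_image_size (pvDiffWitness_adjust_image_size.1) (pvDiffWitness_adjust_image_size.2) ∧ adjust_image_size (pvDiffWitness_adjust_image_size.1) (pvDiffWitness_adjust_image_size.2) = pvDiffWitnessOut_adjust_image_size.1 ∧ adjust_image_size_alt (pvDiffWitness_adjust_image_size.1) (pvDiffWitness_adjust_image_size.2) = pvDiffWitnessOut_adjust_image_size.2 ∧ pvDiffWitnessOut_adjust_image_size.1 ≠ pvDiffWitnessOut_adjust_image_size.2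
def Claim_exact_adjust_image_size : Prop := ∀ (h_ : Int) (w : Int), Dom_adjust_image_size h_ w → D_adjust_image_size h_ w → adjust_image_size h_ w ≠ adjust_image_size_alt h_ w

-- ===== LEMMAS AND PROOFS =====

-- the factor b must be a multiple of for a*b ≡ 0 (mod 8), i.e. 8 / gcd(a, 8)
def chainR (a : Int) : Int :=
  if ¬(2 ∣ a) then 8 else if ¬(4 ∣ a) then 4 else if ¬(8 ∣ a) then 2 else 1

lemma gcd8_eq (c : Int) :
    ((Int.gcd c 8 : Nat) : Int)
      = if ¬(2 ∣ c) then 1 else if ¬(4 ∣ c) then 2 else if ¬(8 ∣ c) then 4 else 8 := by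
  have hg8 : Int.gcd c 8 ∣ 8 := by
    have := Int.gcd_dvd_right c 8
    exact_mod_cast this
  have hgc : ((Int.gcd c 8 : Nat) : Int) ∣ c := Int.gcd_dvd_left c 8
  have henum : Int.gcd c 8 = 1 ∨ Int.gcd c 8 = 2 ∨ Int.gcd c 8 = 4 ∨ Int.gcd c 8 = 8 := by
    have hle : Int.gcd c 8 ≤ 8 := Nat.le_of_dvd (by norm_num) hg8
    have hpos : 0 < Int.gcd c 8 := Int.gcd_pos_of_ne_zero_right c (by norm_num)
    interval_cases h : Int.gcd c 8 <;> revert hg8 <;> simp_all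
  have t2 : (2 : Int) ∣ c → (2 : Nat) ∣ Int.gcd c 8 := fun h =>
    Int.dvd_gcd (by exact_mod_cast h) (by norm_num)
  have t4 : (4 : Int) ∣ c → (4 : Nat) ∣ Int.gcd c 8 := fun h =>
    Int.dvd_gcd (by exact_mod_cast h) (by norm_num)
  have t8 : (8 : Int) ∣ c → (8 : Nat) ∣ Int.gcd c 8 := fun h =>
    Int.dvd_gcd (by exact_mod_cast h) (by norm_num)
  by_cases h2 : (2 : Int) ∣ c
  · by_cases h4 : (4 : Int) ∣ c
    · by_cases h8 : (8 : Int) ∣ c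
      · have := t8 h8
        rcases henum with h | h | h | h <;> rw [h] at this ⊢ <;> simp [h2, h4, h8] <;> omega
      · have := t4 h4
        rcases henum with h | h | h | h <;> rw [h] at this hgc ⊢ <;> simp [h2, h4, h8] <;> omega
    · have := t2 h2
      rcases henum with h | h | h | h <;> rw [h] at this hgc ⊢ <;> simp [h2, h4] <;> omega
  · rcases henum with h | h | h | h <;> rw [h] at hgc ⊢ <;> simp [h2] <;>
      (exfalso; apply h2; exact dvd_trans (by norm_num) hgc)

-- D_'s 8 / gcd(a, 8) is the same factor
lemma gcdR (a : Int) : (8 : Int) / ((Int.gcd a 8 : Nat) : Int) = chainR a := by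
  rw [gcd8_eq]
  unfold chainR
  split_ifs <;> norm_num

lemma chainR_mem (a : Int) : chainR a = 1 ∨ chainR a = 2 ∨ chainR a = 4 ∨ chainR a = 8 := by
  unfold chainR; split_ifs <;> simp

lemma chainR_dvd8 (a : Int) : chainR a ∣ 8 := by
  rcases chainR_mem a with h | h | h | h <;> rw [h] <;> norm_num

lemma countTwos_stop (c p : Int) (h : ¬(0 < c ∧ 2 ∣ c)) : countTwos c p = p := by
  rw [countTwos, dif_neg]
  rw [PySem.Int.mod_eq_zero_iff_dvd]
  exact h

lemma countTwos_step (c p : Int) (h1 : 0 < c) (h2 : 2 ∣ c) :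
    countTwos c p = countTwos (c / 2) (p + 1) := by
  rw [countTwos, dif_pos ⟨h1, (PySem.Int.mod_eq_zero_iff_dvd c 2).mpr h2⟩,
      PySem.Int.floordiv_eq_ediv_of_pos (by norm_num)]

lemma countTwos_ge (c p : Int) : p ≤ countTwos c p := by
  generalize hn : c.toNat = n
  induction n using Nat.strong_induction_on generalizing c p with
  | _ n ih =>
    rw [countTwos]
    split
    · rename_i h
      have h2 : PySem.Int.floordiv c 2 = c / 2 :=
        PySem.Int.floordiv_eq_ediv_of_pos (by norm_num)
      have hlt : (c / 2).toNat < n := by omega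
      have := ih _ hlt (c / 2) (p + 1) rfl
      rw [h2]
      omega
    · omega

-- A's required_factor equals chainR (positive a)
lemma capA_pos (c : Int) (hc : 0 < c) :
    (1 : Int) * 2 ^ (max 0 (3 - countTwos c 0)).toNat = chainR c := by
  unfold chainR
  by_cases h2 : 2 ∣ c
  · by_cases h4 : 4 ∣ c
    · by_cases h8 : 8 ∣ c
      · rw [countTwos_step c 0 hc h2,
            countTwos_step _ _ (by omega) (by omega),
            countTwos_step _ _ (by omega) (by omega)]
        have := countTwos_ge (c / 2 / 2 / 2) 3
        have hm : max 0 (3 - countTwos (c / 2 / 2 / 2) 3) = 0 := by omega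
        simp [h2, h4, h8, hm]
      · rw [countTwos_step c 0 hc h2,
            countTwos_step _ _ (by omega) (by omega),
            countTwos_stop _ _ (by omega)]
        simp [h2, h4, h8]
    · rw [countTwos_step c 0 hc h2, countTwos_stop _ _ (by omega)]
      simp [h2, h4]
  · rw [countTwos_stop c 0 (by tauto)]
    simp [h2]

lemma capA_nonpos (c : Int) (hc : c ≤ 0) :
    (1 : Int) * 2 ^ (max 0 (3 - countTwos c 0)).toNat = 8 := by
  rw [countTwos_stop c 0 (by omega)]
  decide

-- a*x ≡ 0 (mod 8) ↔ chainR a ∣ x, by finite check over the residues mod 8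
lemma mod8_key_res (α ξ : Int) (h1 : 0 ≤ α) (h2 : α < 8) (h3 : 0 ≤ ξ) (h4 : ξ < 8) :
    ((α * ξ)% 8 = 0 ↔ ξ% (chainR α) = 0) := by
  interval_cases α <;> interval_cases ξ <;> decide

lemma mod8_key (a x : Int) : ((a * x)% 8 = 0 ↔ x% (chainR a) = 0) := by
  have hch : chainR a = chainR (a% 8) := by
    unfold chainR
    have e2 : (2:Int) ∣ a ↔ 2 ∣ a% 8 := by omega
    have e4 : (4:Int) ∣ a ↔ 4 ∣ a% 8 := by omega
    have e8 : (8:Int) ∣ a ↔ 8 ∣ a% 8 := by omega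
    simp only [e2, e4, e8]
  have h1 : (a * x)% 8 = ((a% 8) * (x% 8))% 8 := by
    rw [Int.mul_emod]
  have hx : x% (chainR (a% 8)) = (x% 8)% (chainR (a% 8)) :=
    (Int.emod_emod_of_dvd x (chainR_dvd8 _)).symm
  rw [h1, hch, hx]
  exact mod8_key_res (a% 8) (x% 8)
    (Int.emod_nonneg _ (by norm_num)) (Int.emod_lt_of_pos _ (by norm_num))
    (Int.emod_nonneg _ (by norm_num)) (Int.emod_lt_of_pos _ (by norm_num))

-- the search lands on b plus the distance to the next multiple of chainR a
lemma search_eq_aux (a r : Int) (hrmem : r = 1 ∨ r = 2 ∨ r = 4 ∨ r = 8)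
    (hkey : ∀ x : Int, ((a * x)% 8 = 0 ↔ x% r = 0)) (b : Int) :
    searchB a b = b + (-b)% r := by
  generalize hn : ((-b)% r).toNat = n
  induction n using Nat.strong_induction_on generalizing b with
  | _ n ih =>
    rw [searchB]
    by_cases hc : (a * b)% 8 = 0
    · rw [dif_neg (by rw [PySem.Int.mod_eq_emod_of_pos (by norm_num)]; simpa using hc)]
      have hb0 : b% r = 0 := (hkey b).mp hc
      have : (-b)% r = 0 := by
        rcases hrmem with h | h | h | h <;> rw [h] at hb0 ⊢ <;> omega
      omega
    · rw [dif_pos (by rw [PySem.Int.mod_eq_emod_of_pos (by norm_num)]; simpa using hc)]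
      have hb0 : b% r ≠ 0 := fun h0 => hc ((hkey b).mpr h0)
      have h2 : (-(b+1))% r = (-b)% r - 1 ∧ 0 < (-b)% r := by
        rcases hrmem with h | h | h | h <;> rw [h] at hb0 ⊢ <;> omega
      have hlt : ((-(b+1))% r).toNat < n := by omega
      have hrec := ih _ hlt (b+1) rfl
      omega

lemma search_eq (a b : Int) : searchB a b = b + (-b)% (chainR a) :=
  search_eq_aux a (chainR a) (chainR_mem a) (fun x => mod8_key a x) b

-- A's ceiling rounding in the same normal form
lemma ceil_round (b r : Int) (hr : 0 < r) :
    -(PySem.Int.floordiv (-b) r) * r = b + (-b)% r := by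
  rw [PySem.Int.floordiv_eq_ediv_of_pos hr]
  have h : (-b) % r + r * ((-b) / r) = -b := Int.emod_add_mul_ediv (-b) r
  linear_combination -h

lemma ceil_mul_div (x : Int) : PySem.Int.floordiv (-(PySem.Int.floordiv (-x) 16) * 16) 16
    = -(PySem.Int.floordiv (-x) 16) := by
  rw [PySem.Int.floordiv_eq_ediv_of_pos (by norm_num : (0:Int) < 16)
        (a := -(PySem.Int.floordiv (-x) 16) * 16)]
  omega

lemma round_agree (b0 r : Int) (hrmem : r = 1 ∨ r = 2 ∨ r = 4 ∨ r = 8)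
    (h : ¬(b0% 8 ≠ 0 ∧ b0% 8 ≤ 8 - r)) : (-b0)% 8 = (-b0)% r := by
  rcases hrmem with hr | hr | hr | hr <;> rw [hr] at h ⊢ <;> omega

lemma round_ne (b0 r : Int) (hrmem : r = 1 ∨ r = 2 ∨ r = 4 ∨ r = 8)
    (h : b0% 8 ≠ 0 ∧ b0% 8 ≤ 8 - r) : (-b0)% 8 ≠ (-b0)% r := by
  rcases hrmem with hr | hr | hr | hr <;> rw [hr] at h ⊢ <;> omega

lemma c_nonpos (h_ : Int) (h : h_ ≤ 0) : -(PySem.Int.floordiv (-h_) 16) ≤ 0 := by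
  rw [PySem.Int.floordiv_eq_ediv_of_pos (by norm_num : (0:Int) < 16)]
  omega

lemma c_pos (h_ : Int) (h : 0 < h_) : 0 < -(PySem.Int.floordiv (-h_) 16) := by
  rw [PySem.Int.floordiv_eq_ediv_of_pos (by norm_num : (0:Int) < 16)]
  omega

-- ===== VERDICT (by name: the statement is the Claim_ definition above) =====
theorem adjust_image_size_spec : Claim_unchanged_adjust_image_size := by
  intro h_ w _ hnd
  unfold adjust_image_size adjust_image_size_alt pyCeil
  simp only []
  set c := -(PySem.Int.floordiv (-h_) 16) with hc
  set b0 := -(PySem.Int.floordiv (-w) 16) with hb0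
  rw [ceil_mul_div h_, search_eq]
  by_cases hpos : 0 < h_
  · rw [capA_pos c (c_pos h_ hpos), ceil_round b0 (chainR c)
        (by rcases chainR_mem c with h | h | h | h <;> rw [h] <;> norm_num)]
  · rw [capA_nonpos c (c_nonpos h_ (by omega)), ceil_round b0 8 (by norm_num)]
    unfold D_adjust_image_size at hnd
    simp only [← hc, ← hb0, gcdR, PySem.Int.mod_eq_emod_of_pos (show (0:Int) < 8 by norm_num)] at hnd
    have hm : ¬(b0% 8 ≠ 0 ∧ b0% 8 ≤ 8 - chainR c) := fun hx => hnd ⟨by omega, hx⟩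
    rw [round_agree b0 (chainR c) (chainR_mem c) hm]

lemma adjust_A_at_witness : adjust_image_size 0 16 = (0, 128) := by
  unfold adjust_image_size
  simp only [show PySem.Int.floordiv (pyCeil (0:Int) 16 * 16) 16 = 0 by decide]
  rw [countTwos_stop 0 0 (by norm_num)]
  decide

lemma adjust_B_at_witness : adjust_image_size_alt 0 16 = (0, 16) := by
  unfold adjust_image_size_alt
  simp only []
  rw [search_eq]
  decide

theorem adjust_image_size_changed : Claim_changed_adjust_image_size := by
  unfold Claim_changed_adjust_image_size
  exact ⟨by decide, by decide, adjust_A_at_witness, adjust_B_at_witness, by decide⟩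

theorem adjust_image_size_tight : Claim_exact_adjust_image_size := by
  intro h_ w _ hd
  unfold D_adjust_image_size at hd
  obtain ⟨hle, hd'⟩ := hd
  unfold adjust_image_size adjust_image_size_alt pyCeil
  simp only []
  rw [ceil_mul_div h_, search_eq, capA_nonpos _ (c_nonpos h_ hle),
      ceil_round _ 8 (by norm_num)]
  simp only [gcdR, PySem.Int.mod_eq_emod_of_pos (show (0:Int) < 8 by norm_num)] at hd'
  intro heq
  have h2 := congrArg Prod.snd heq
  simp only [] at h2
  have hne := round_ne (-(PySem.Int.floordiv (-w) 16))
    (chainR (-(PySem.Int.floordiv (-h_) 16))) (chainR_mem _) hd'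
  omega
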